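-- pv_equiv track=rewrite | github.com/swarka7/CodeScope | src/codescope/debugging/failure_signals.py | has_validation_name
-- ===== SOURCE A (Python) =====
-- VALIDATION_NAME_PREFIXES = (
--     "validate",
--     "check",
--     "ensure",
--     "guard",
--     "can",
--     "allow",
--     "authorize",
-- )
--
-- def has_validation_name(name: str) -> bool:
--     lower = name.lower().lstrip("_")
--     for prefix in VALIDATION_NAME_PREFIXES:
--         if lower == prefix or lower.startswith(f"{prefix}_"):
--             return True
--         if prefix != "can" and lower.startswith(prefix):
--             return True
--     return False
-- ===== SOURCE B (Python) =====
-- def has_validation_name(name: str) -> bool: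
--     lower = name.lower().lstrip("_")
--     c = lower[:1]
--     if c == "v":
--         return lower.startswith("validate")
--     if c == "e":
--         return lower.startswith("ensure")
--     if c == "g":
--         return lower.startswith("guard")
--     if c == "a":
--         return lower.startswith("allow") or lower.startswith("authorize")
--     if c == "c":
--         return lower.startswith("check") or lower[:4] in ("can", "can_")
--     return False
-- ===== Notes on version B (the rewrite author's own statement) =====
-- stated objective: simpler
-- what changed: Replaced A's scan over the 7-prefix tuple (with an eq/startswith-underscore/startswith test per prefix) by a single dispatch on the first character of the normalized name, with one startswith per matching class and a [:4]-slice test for the can/can_ boundary case.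
import Mathlib
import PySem

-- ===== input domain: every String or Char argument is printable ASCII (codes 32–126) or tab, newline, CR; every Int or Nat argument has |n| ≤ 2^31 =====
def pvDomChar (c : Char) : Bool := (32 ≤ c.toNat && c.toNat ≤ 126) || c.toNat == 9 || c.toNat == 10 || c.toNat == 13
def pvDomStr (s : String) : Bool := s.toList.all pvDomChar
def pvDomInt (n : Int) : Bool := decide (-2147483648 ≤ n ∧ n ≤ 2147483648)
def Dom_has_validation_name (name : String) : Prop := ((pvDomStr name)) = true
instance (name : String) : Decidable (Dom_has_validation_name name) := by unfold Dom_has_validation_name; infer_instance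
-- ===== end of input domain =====

-- B replaces A's scan over the 7-prefix tuple by a single dispatch on the first character of the
-- normalized name (the prefixes fall into 5 disjoint first-letter classes); objective: alternative/simpler.

-- the module constant VALIDATION_NAME_PREFIXES, as char lists
def pvValidate : List Char := ['v','a','l','i','d','a','t','e']
def pvCheck : List Char := ['c','h','e','c','k']
def pvEnsure : List Char := ['e','n','s','u','r','e']
def pvGuard : List Char := ['g','u','a','r','d']
def pvCan : List Char := ['c','a','n']
def pvAllow : List Char := ['a','l','l','o','w']
def pvAuthorize : List Char := ['a','u','t','h','o','r','i','z','e']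
def pvValidationPrefixes : List (List Char) :=
  [pvValidate, pvCheck, pvEnsure, pvGuard, pvCan, pvAllow, pvAuthorize]

-- ===== PORT A =====
-- name.lower().lstrip("_"): lower via PySem.Chars.lower; lstrip("_") ported by hand as
-- dropWhile (· == '_'), exact since exactly the leading '_' characters are removed.
-- The for-loop with early `return True` is List.any over the prefix tuple, each iteration
-- testing A's two ifs in order.
def has_validation_name (name : String) : Bool :=
  let lower := (PySem.Chars.lower name.toList).dropWhile (fun ch => ch == '_')
  pvValidationPrefixes.any (fun p =>
    ((lower == p || PySem.Chars.startswith lower (p ++ ['_'])) ||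
     (!(p == pvCan) && PySem.Chars.startswith lower p)))

-- ===== PORT B =====
-- Source B: same normalization, then c = lower[:1] (List.take 1, exact for this nonnegative bound)
-- and a first-letter dispatch; lower[:4] in ("can", "can_") is List.take 4 compared to the two literals.
def has_validation_name_alt (name : String) : Bool :=
  let lower := (PySem.Chars.lower name.toList).dropWhile (fun ch => ch == '_')
  let c := lower.take 1
  if c == ['v'] then PySem.Chars.startswith lower pvValidate
  else if c == ['e'] then PySem.Chars.startswith lower pvEnsure
  else if c == ['g'] then PySem.Chars.startswith lower pvGuard
  else if c == ['a'] then PySem.Chars.startswith lower pvAllow || PySem.Chars.startswith lower pvAuthorize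
  else if c == ['c'] then PySem.Chars.startswith lower pvCheck ||
    (lower.take 4 == pvCan || lower.take 4 == ['c','a','n','_'])
  else false

-- ===== PRECONDITION & SPEC =====
def Spec_has_validation_name (name : String) (out : Bool) : Prop := out = has_validation_name_alt name
instance (name : String) (out : Bool) : Decidable (Spec_has_validation_name name out) := by unfold Spec_has_validation_name; infer_instance

-- ===== CLAIM (what is proved, stated in full; the proofs are below) =====
def Claim_equal_has_validation_name : Prop := ∀ (name : String), Dom_has_validation_name name → Spec_has_validation_name name (has_validation_name name)

-- ===== LEMMAS AND PROOFS =====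

-- for a non-"can" prefix, A's per-iteration test collapses to plain startswith
lemma pv_termNonCan (p l : List Char) (h : ¬ p = pvCan) :
    ((l == p || PySem.Chars.startswith l (p ++ ['_'])) ||
     (!(p == pvCan) && PySem.Chars.startswith l p)) = PySem.Chars.startswith l p := by
  rw [Bool.eq_iff_iff]
  simp only [Bool.or_eq_true, Bool.and_eq_true, PySem.Chars.startswith_iff, beq_iff_eq,
    Bool.not_eq_true', beq_eq_false_iff_ne, ne_eq]
  constructor
  · rintro ((rfl | hp) | ⟨-, hp⟩)
    · exact List.prefix_refl _
    · exact (List.prefix_append p ['_']).trans hp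
    · exact hp
  · intro hp; exact Or.inr ⟨h, hp⟩

lemma pv_take_eq_of_lt (l p : List Char) (n : Nat) (h : p.length < n) : l.take n = p ↔ l = p := by
  constructor
  · intro heq
    have hl := congrArg List.length heq
    simp only [List.length_take] at hl
    have : l.length ≤ n := by omega
    rwa [List.take_of_length_le this] at heq
  · rintro rfl; exact List.take_of_length_le (by omega)

lemma pv_take_eq_of_len (l p : List Char) (n : Nat) (h : p.length = n) : l.take n = p ↔ p <+: l := by
  rw [List.prefix_iff_eq_take, h]
  exact comm

-- the two loop bodies agree on every char list
lemma pv_key (l : List Char) :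
    (pvValidationPrefixes.any (fun p =>
      ((l == p || PySem.Chars.startswith l (p ++ ['_'])) ||
       (!(p == pvCan) && PySem.Chars.startswith l p))))
    = (let c := l.take 1
       if c == ['v'] then PySem.Chars.startswith l pvValidate
       else if c == ['e'] then PySem.Chars.startswith l pvEnsure
       else if c == ['g'] then PySem.Chars.startswith l pvGuard
       else if c == ['a'] then PySem.Chars.startswith l pvAllow || PySem.Chars.startswith l pvAuthorize
       else if c == ['c'] then PySem.Chars.startswith l pvCheck ||
         (l.take 4 == pvCan || l.take 4 == ['c','a','n','_'])
       else false) := by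
  rcases l with _ | ⟨c, t⟩
  · decide
  · simp only [pvValidationPrefixes, List.any_cons, List.any_nil, Bool.or_false,
      pv_termNonCan pvValidate _ (by decide), pv_termNonCan pvCheck _ (by decide),
      pv_termNonCan pvEnsure _ (by decide), pv_termNonCan pvGuard _ (by decide),
      pv_termNonCan pvAllow _ (by decide), pv_termNonCan pvAuthorize _ (by decide)]
    rw [Bool.eq_iff_iff]
    by_cases hc : c = 'c'
    · subst hc
      simp [pvValidate, pvCheck, pvEnsure, pvGuard, pvCan, pvAllow, pvAuthorize, List.take,
        PySem.Chars.startswith_iff, List.cons_prefix_cons,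
        pv_take_eq_of_lt t ['a','n'] 3 (by decide), pv_take_eq_of_len t ['a','n','_'] 3 (by decide)]
    · by_cases hv : c = 'v' <;> by_cases he : c = 'e' <;> by_cases hg : c = 'g' <;>
        by_cases ha : c = 'a' <;>
      simp_all [pvValidate, pvCheck, pvEnsure, pvGuard, pvCan, pvAllow, pvAuthorize, List.take,
        PySem.Chars.startswith_iff, List.cons_prefix_cons] <;>
      (refine ⟨?_, ?_, ?_, ?_, ?_, ?_, ?_⟩ <;> intro h <;> subst h <;> simp_all)

-- ===== VERDICT (by name: the statement is the Claim_ definition above) =====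
theorem has_validation_name_spec : Claim_equal_has_validation_name := by
  intro name _
  unfold Spec_has_validation_name has_validation_name has_validation_name_alt
  exact pv_key _
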